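-- pv_equiv track=rewrite | github.com/meb-team/bioinfoscripts | assembly_statistics.py | get_extreme_contigs
-- ===== SOURCE A (Python) =====
-- def get_extreme_contigs(seq_d):
--     """Return the length of the longest and the smallest contigs"""
--     contigs_size = list()
--
--     for contig, seq in seq_d.items():
--         contigs_size.append(len(seq))
--
--     contigs_size.sort(reverse=True)
--     if len(contigs_size) == 1:
--         return contigs_size[0], contigs_size[0]
--     else:
--         return contigs_size[0], contigs_size[-1]
-- ===== SOURCE B (Python) =====
-- def get_extreme_contigs(seq_d):
--     """Return the length of the longest and the smallest contigs"""
--     values = list(seq_d.values())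
--     longest = shortest = len(values[0])
--     for seq in values[1:]:
--         l = len(seq)
--         if l > longest:
--             longest = l
--         if l < shortest:
--             shortest = l
--     return longest, shortest
-- ===== Notes on version B (the rewrite author's own statement) =====
-- stated objective: alternative
-- what changed: Replaces building a length list and sorting it in reverse with a single running-max/min scan over the values, indexing the first value so the empty-dict IndexError is preserved.
import Mathlib
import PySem

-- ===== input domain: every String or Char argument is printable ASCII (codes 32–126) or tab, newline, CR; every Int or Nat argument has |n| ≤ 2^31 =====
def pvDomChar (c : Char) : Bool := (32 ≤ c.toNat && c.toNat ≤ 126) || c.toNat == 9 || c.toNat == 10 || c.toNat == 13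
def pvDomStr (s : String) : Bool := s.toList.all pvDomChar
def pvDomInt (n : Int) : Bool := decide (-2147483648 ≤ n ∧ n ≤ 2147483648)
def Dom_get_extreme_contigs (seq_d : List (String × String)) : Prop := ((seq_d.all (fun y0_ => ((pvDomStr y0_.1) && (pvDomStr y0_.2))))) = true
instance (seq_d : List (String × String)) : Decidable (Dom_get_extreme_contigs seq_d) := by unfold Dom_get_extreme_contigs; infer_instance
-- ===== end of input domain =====

-- B replaces "collect lengths, reverse-sort, take first/last" by a single running max/min scan over the values.


-- ===== PORT A =====
def get_extreme_contigs (seq_d : List (String × String)) : List Int :=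
  let contigs_size := seq_d.foldl (fun acc p => acc ++ [PySem.Str.len p.2]) []
  let contigs_size := PySem.List.sorted contigs_size (fun x => x) true
  if contigs_size.length = 1 then
    [PySem.List.pyGetD contigs_size 0 0, PySem.List.pyGetD contigs_size 0 0]
  else
    [PySem.List.pyGetD contigs_size 0 0, PySem.List.pyGetD contigs_size (-1) 0]

-- ===== PORT B =====
def get_extreme_contigs_alt (seq_d : List (String × String)) : List Int :=
  let values := seq_d.map (fun p => p.2)
  match values with
  | [] => []   -- unreachable under Pre_ (Python raises IndexError on values[0])
  | v :: rest =>
    let l0 := PySem.Str.len v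
    let r := rest.foldl
      (fun (p : Int × Int) s =>
        let l := PySem.Str.len s
        (if l > p.1 then l else p.1, if l < p.2 then l else p.2)) (l0, l0)
    [r.1, r.2]

-- ===== PRECONDITION & SPEC =====
-- A raises IndexError on the empty dict (contigs_size[0]); B raises there too.
def Pre_get_extreme_contigs (seq_d : List (String × String)) : Prop := seq_d ≠ []
instance (seq_d : List (String × String)) : Decidable (Pre_get_extreme_contigs seq_d) := by unfold Pre_get_extreme_contigs; infer_instance
def pvWitness_get_extreme_contigs : (List (String × String)) := [("c1", "ACGT"), ("c2", "AC")]

def Spec_get_extreme_contigs (seq_d : List (String × String)) (out : List Int) : Prop := out = get_extreme_contigs_alt seq_d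
instance (seq_d : List (String × String)) (out : List Int) : Decidable (Spec_get_extreme_contigs seq_d out) := by unfold Spec_get_extreme_contigs; infer_instance

-- ===== CLAIM (what is proved, stated in full; the proofs are below) =====
def Claim_equal_get_extreme_contigs : Prop := ∀ (seq_d : List (String × String)), Dom_get_extreme_contigs seq_d → Pre_get_extreme_contigs seq_d → Spec_get_extreme_contigs seq_d (get_extreme_contigs seq_d)

-- ===== LEMMAS AND PROOFS =====

-- B's pair fold computes (running max, running min) of the lengths.
theorem pv_pairfold (rest : List (String × String)) : ∀ a b : Int,
    (rest.map (fun p => p.2)).foldl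
      (fun (p : Int × Int) s =>
        let l := PySem.Str.len s
        (if l > p.1 then l else p.1, if l < p.2 then l else p.2)) (a, b)
      = ((rest.map (fun p => PySem.Str.len p.2)).foldl max a,
         (rest.map (fun p => PySem.Str.len p.2)).foldl min b) := by
  induction rest with
  | nil => intro a b; rfl
  | cons x t ih =>
    intro a b
    simp only [List.map_cons, List.foldl_cons]
    rw [show (if PySem.Str.len x.2 > a then PySem.Str.len x.2 else a) = max a (PySem.Str.len x.2) from by split <;> omega]
    rw [show (if PySem.Str.len x.2 < b then PySem.Str.len x.2 else b) = min b (PySem.Str.len x.2) from by split <;> omega]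
    exact ih (max a (PySem.Str.len x.2)) (min b (PySem.Str.len x.2))

-- in a pairwise-descending list the last element is a lower bound
theorem pv_getLast_le (s : List Int) (hne : s ≠ [])
    (hp : s.Pairwise (fun a b => b ≤ a)) : ∀ x ∈ s, s.getLast hne ≤ x := by
  induction s with
  | nil => cases hne rfl
  | cons m t ih =>
    intro x hx
    rw [List.mem_cons] at hx
    cases t with
    | nil =>
      rcases hx with rfl | hx
      · simp
      · simp at hx
    | cons y u =>
      rw [List.getLast_cons (by simp)]
      rcases hx with rfl | hx
      · have h1 := List.rel_of_pairwise_cons hp (List.mem_cons_self)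
        have h2 := ih (by simp) (List.Pairwise.of_cons hp) y (by simp)
        omega
      · exact ih (by simp) (List.Pairwise.of_cons hp) x hx

theorem pv_main (seq_d : List (String × String)) (hne : seq_d ≠ []) :
    get_extreme_contigs seq_d = get_extreme_contigs_alt seq_d := by
  obtain ⟨q, rest, rfl⟩ := List.exists_cons_of_ne_nil hne
  unfold get_extreme_contigs get_extreme_contigs_alt
  simp only [List.map_cons]
  rw [show ((q :: rest).foldl (fun acc p => acc ++ [PySem.Str.len p.2]) []) =
        (q :: rest).map (fun p => PySem.Str.len p.2) from by
      simpa using PySem.List.foldl_append_singleton_eq_map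
        (fun p : String × String => PySem.Str.len p.2) (q :: rest) []]
  rw [pv_pairfold]
  set l0 := PySem.Str.len q.2 with hl0
  set lens : List Int := (q :: rest).map (fun p => PySem.Str.len p.2) with hlens
  set s := PySem.List.sorted lens (fun x => x) true with hs
  have hsne : s ≠ [] := by
    intro h
    have := (PySem.List.sorted_eq_nil_iff lens (fun x => x) true).mp h
    simp [hlens] at this
  obtain ⟨m, t, hmt⟩ := List.exists_cons_of_ne_nil hsne
  have hperm : s.Perm lens := PySem.List.sorted_perm _ _ _
  -- max side
  have hM := PySem.List.le_foldl_max (rest.map (fun p => PySem.Str.len p.2)) l0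
  set M := (rest.map (fun p => PySem.Str.len p.2)).foldl max l0 with hMdef
  have hMmem : M ∈ lens := by
    rcases PySem.List.foldl_max_mem (rest.map (fun p => PySem.Str.len p.2)) l0 with h | h
    · have hMl0 : M = l0 := h
      rw [hMl0, hl0, hlens, List.map_cons]; exact List.mem_cons_self
    · rw [hlens, List.map_cons]; exact List.mem_cons_of_mem _ h
  have hMub : ∀ y ∈ lens, y ≤ M := by
    intro y hy
    rw [hlens, List.map_cons, List.mem_cons] at hy
    rcases hy with rfl | hy
    · exact hM.1
    · exact hM.2 y hy
  have hmub : ∀ y ∈ lens, y ≤ m :=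
    PySem.List.key_head_sorted_rev_ge lens (fun x => x) (hs ▸ hmt)
  have hmmem : m ∈ lens := hperm.mem_iff.mp (hmt ▸ List.mem_cons_self)
  have hmM : m = M := le_antisymm (hMub m hmmem) (hmub M hMmem)
  -- min side
  have hmin := PySem.List.foldl_min_le (rest.map (fun p => PySem.Str.len p.2)) l0
  set N := (rest.map (fun p => PySem.Str.len p.2)).foldl min l0 with hNdef
  have hNmem : N ∈ lens := by
    rcases PySem.List.foldl_min_mem (rest.map (fun p => PySem.Str.len p.2)) l0 with h | h
    · have hNl0 : N = l0 := h
      rw [hNl0, hl0, hlens, List.map_cons]; exact List.mem_cons_self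
    · rw [hlens, List.map_cons]; exact List.mem_cons_of_mem _ h
  have hNlb : ∀ y ∈ lens, N ≤ y := by
    intro y hy
    rw [hlens, List.map_cons, List.mem_cons] at hy
    rcases hy with rfl | hy
    · exact hmin.1
    · exact hmin.2 y hy
  have hlast : ∀ x ∈ s, s.getLast hsne ≤ x :=
    pv_getLast_le s hsne (PySem.List.sorted_pairwise_rev lens (fun x => x))
  have hlastmem : s.getLast hsne ∈ lens := hperm.mem_iff.mp (List.getLast_mem hsne)
  have hlN : s.getLast hsne = N :=
    le_antisymm (hlast N (hperm.mem_iff.mpr hNmem)) (hNlb _ hlastmem)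
  -- assemble
  rw [PySem.List.pyGetD_neg_one s 0 hsne]
  have hhead : PySem.List.pyGetD s 0 0 = m := by rw [hmt, PySem.List.pyGetD_zero_cons]
  by_cases hlen : s.length = 1
  · have hlm : s.getLast hsne = m := by
      have h1 : s.getLast hsne ∈ s := List.getLast_mem hsne
      have ht : t = [] := by rw [hmt] at hlen; simpa using hlen
      have hall : ∀ x ∈ s, x = m := by rw [hmt, ht]; simp
      exact hall _ h1
    rw [if_pos hlen, hhead, hmM, ← hlN, hlm, hmM]
  · rw [if_neg hlen, hhead, hmM, hlN]

-- ===== VERDICT (by name: the statement is the Claim_ definition above) =====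
theorem get_extreme_contigs_spec : Claim_equal_get_extreme_contigs := by
  intro seq_d _ hpre
  unfold Spec_get_extreme_contigs
  exact pv_main seq_d hpre
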